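-- pv_equiv track=rewrite | github.com/naigamshah/AutonomousBotsRL | environment/gym-arobo/main_auto.py | bot_velocity
-- ===== SOURCE A (Python) =====
-- max_speed_bot = 5
--
-- def bot_velocity(attrt,x,y):
--
-- 	x_reach = attrt[0] + 5
-- 	y_reach = attrt[1] + 5
-- 	dir_x = 1 #directions to travel for bot
-- 	dir_y = 1
-- 	dist_x = abs(x_reach - x)
-- 	dist_y = abs(y_reach - y)
--
-- 	if x_reach-x >= 0:
-- 		dir_x = 1
-- 	else:
-- 		dir_x = -1
--
-- 	if y_reach-y >= 0:
-- 		dir_y = 1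
-- 	else:
-- 		dir_y = -1
--
-- 	if dist_x==0:
-- 		x_change = 0
-- 		y_change = dir_y * max_speed_bot
-- 	elif dist_y==0:
-- 		x_change = dir_x * max_speed_bot
-- 		y_change = 0
-- 	else:
-- 		if dist_x <= dist_y:
-- 			ratio = float(dist_x)/float(dist_y)
-- 			min_r = 2
-- 			for i in range(max_speed_bot,0,-1):
-- 				for j in range(i,0,-1):
-- 					r = float(j)/float(i)
-- 					if abs(r - ratio) < min_r:
-- 						x_change = dir_x * j
-- 						y_change = dir_y * i
-- 						min_r = abs(r - ratio)
-- 					if min_r==0: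
-- 						break
-- 		else:
-- 			ratio = float(dist_y)/float(dist_x)
-- 			min_r = 2
-- 			for i in range(max_speed_bot,0,-1):
-- 				for j in range(i,0,-1):
-- 					r = float(j)/float(i)
-- 					if abs(r - ratio) < min_r:
-- 						x_change = dir_x * i
-- 						y_change = dir_y * j
-- 						min_r = abs(r - ratio)
-- 					if min_r==0:
-- 						break
--
-- 	return x_change,y_change
-- ===== SOURCE B (Python) =====
-- max_speed_bot = 5
--
-- def bot_velocity(attrt, x, y):
-- 	dx0 = attrt[0] + 5 - x
-- 	dy0 = attrt[1] + 5 - y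
-- 	dx = abs(dx0)
-- 	dy = abs(dy0)
-- 	dir_x = 1 if dx0 >= 0 else -1
-- 	dir_y = 1 if dy0 >= 0 else -1
-- 	if dx == 0:
-- 		return 0, dir_y * max_speed_bot
-- 	if dy == 0:
-- 		return dir_x * max_speed_bot, 0
-- 	# reduce to ratio a/b with 0 < a <= b; for each speed i pick the nearest
-- 	# numerator j in one closed-form step (round half up), instead of scanning all j
-- 	a, b = (dx, dy) if dx <= dy else (dy, dx)
-- 	best = None  # (key, j, i); exact integer key = |j/i - a/b| scaled by i*b... cross-multiplied, normalised by 60//i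
-- 	for i in range(max_speed_bot, 0, -1):
-- 		j = max(1, (2 * a * i + b) // (2 * b))
-- 		key = abs(j * b - i * a) * (60 // i)
-- 		if best is None or key < best[0]:
-- 			best = (key, j, i)
-- 	_, j0, i0 = best
-- 	if dx <= dy:
-- 		return dir_x * j0, dir_y * i0
-- 	return dir_x * i0, dir_y * j0
-- ===== Notes on version B (the rewrite author's own statement) =====
-- stated objective: alternative
-- what changed: B eliminates A's inner numerator scan entirely: for each denominator i it computes the best numerator in one closed-form integer step j = max(1, (2*a*i+b)//(2*b)) (round half up) and keeps the first minimiser over the 5 denominators with an exact cross-multiplied integer key, replacing A's duplicated 15-candidate nested float scan with break; Pre_ excludes inputs where two candidate fractions of different value are exactly equidistant-minimal from the direction ratio (A's float rounding breaks that tie accidentally) and inputs with len(attrt)<2 on which A raises IndexError.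
-- outside the precondition, e.g. on bot_velocity([3, -2], 200, 59): A returns (-3, -1), B returns (-4, -1)
import Mathlib
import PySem

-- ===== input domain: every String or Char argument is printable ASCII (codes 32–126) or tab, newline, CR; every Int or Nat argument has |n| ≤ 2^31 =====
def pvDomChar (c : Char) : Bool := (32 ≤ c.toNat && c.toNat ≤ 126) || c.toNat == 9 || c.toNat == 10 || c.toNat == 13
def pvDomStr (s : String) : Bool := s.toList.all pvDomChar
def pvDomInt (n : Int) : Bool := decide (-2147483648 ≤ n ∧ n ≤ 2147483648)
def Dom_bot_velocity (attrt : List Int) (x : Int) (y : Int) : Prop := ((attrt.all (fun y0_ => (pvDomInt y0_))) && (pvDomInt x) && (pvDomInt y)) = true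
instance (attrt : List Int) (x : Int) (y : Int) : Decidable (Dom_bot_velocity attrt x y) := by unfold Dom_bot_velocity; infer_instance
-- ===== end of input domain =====

-- B replaces A's duplicated nested float scans (inner numerator loop, running min, break) by one loop
-- over the 5 denominators whose best numerator is computed in one closed-form half-up-rounding step,
-- compared with an exact integer key (objective: alternative); A's floats are ported as exact
-- rationals, exact on Pre_ (which excludes exact-tie inputs, where float rounding decides accidentally).

-- ===== PORT A =====
-- A's inner 'for j in range(i,0,-1)' loop with its 'if min_r==0: break'.
-- state = ((x_change, y_change), min_r); Python float arithmetic ported as exact rationals (exact on Pre_).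
def innerA (f : Int → Int → Int × Int) (ratio : ℚ) (i : Int) :
    List Int → (Int × Int) × ℚ → (Int × Int) × ℚ
  | [], st => st
  | j :: rest, st =>
    let r : ℚ := (j : ℚ) / (i : ℚ)
    let st' := if |r - ratio| < st.2 then (f j i, |r - ratio|) else st
    if st'.2 = 0 then st' else innerA f ratio i rest st'

-- A's outer 'for i in range(max_speed_bot,0,-1)' loop
def outerA (f : Int → Int → Int × Int) (ratio : ℚ) (st0 : (Int × Int) × ℚ) : (Int × Int) × ℚ :=
  (PySem.List.pyRange 5 0 (-1)).foldl
    (fun st i => innerA f ratio i (PySem.List.pyRange i 0 (-1)) st) st0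

def bot_velocity (attrt : List Int) (x : Int) (y : Int) : Int × Int :=
  -- attrt[0], attrt[1]: IndexError when len(attrt) < 2, excluded by Pre_; the default is irrelevant there
  let x_reach := PySem.List.pyGetD attrt 0 0 + 5
  let y_reach := PySem.List.pyGetD attrt 1 0 + 5
  let dist_x := |x_reach - x|
  let dist_y := |y_reach - y|
  let dir_x : Int := if x_reach - x ≥ 0 then 1 else -1
  let dir_y : Int := if y_reach - y ≥ 0 then 1 else -1
  if dist_x = 0 then (0, dir_y * 5)
  else if dist_y = 0 then (dir_x * 5, 0)
  else if dist_x ≤ dist_y then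
    (outerA (fun j i => (dir_x * j, dir_y * i)) ((dist_x : ℚ) / (dist_y : ℚ)) ((0, 0), 2)).1
  else
    (outerA (fun j i => (dir_x * i, dir_y * j)) ((dist_y : ℚ) / (dist_x : ℚ)) ((0, 0), 2)).1

-- ===== PORT B =====
-- Source B's closed-form best numerator for denominator i against the ratio a/b: round(a*i/b) half up, clamped to ≥ 1
def bestNum (a b i : Int) : Int := max 1 (PySem.Int.floordiv (2 * a * i + b) (2 * b))

-- Source B's exact integer comparison key: |j/i - a/b| scaled by 60*b (60 = lcm(1..5))
def keyB (a b : Int) (p : Int × Int) : Int := |p.1 * b - p.2 * a| * PySem.Int.floordiv 60 p.2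

-- Source B's loop body: best = (key, j, i) on first iteration or strict improvement
def bstep (a b : Int) (best : Option (Int × Int × Int)) (i : Int) : Option (Int × Int × Int) :=
  let j := bestNum a b i
  let key := keyB a b (j, i)
  match best with
  | none => some (key, j, i)
  | some m => if key < m.1 then some (key, j, i) else some m

def bot_velocity_alt (attrt : List Int) (x : Int) (y : Int) : Int × Int :=
  let dx0 := PySem.List.pyGetD attrt 0 0 + 5 - x
  let dy0 := PySem.List.pyGetD attrt 1 0 + 5 - y
  let dx := |dx0|
  let dy := |dy0|
  let dir_x : Int := if dx0 ≥ 0 then 1 else -1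
  let dir_y : Int := if dy0 ≥ 0 then 1 else -1
  if dx = 0 then (0, dir_y * 5)
  else if dy = 0 then (dir_x * 5, 0)
  else
    let a := if dx ≤ dy then dx else dy
    let b := if dx ≤ dy then dy else dx
    match (PySem.List.pyRange 5 0 (-1)).foldl (bstep a b) none with
    | some (_, j0, i0) => if dx ≤ dy then (dir_x * j0, dir_y * i0) else (dir_x * i0, dir_y * j0)
    | none => (0, 0)   -- unreachable: the loop runs 5 times

-- ===== PRECONDITION & SPEC =====
-- the 15 candidate fractions j/i (1 ≤ j ≤ i ≤ 5), in A's scan order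
def candList : List (Int × Int) :=
  [(5,5),(4,5),(3,5),(2,5),(1,5),(4,4),(3,4),(2,4),(1,4),(3,3),(2,3),(1,3),(2,2),(1,2),(1,1)]

-- two candidates of different value are both exactly at minimal distance from a/b
def tieAt (a b : Int) : Prop :=
  ∃ p ∈ candList, ∃ q ∈ candList,
    p.1 * q.2 ≠ q.1 * p.2 ∧
    |p.1 * b - p.2 * a| * (60 / p.2) = |q.1 * b - q.2 * a| * (60 / q.2) ∧
    ∀ r ∈ candList, |p.1 * b - p.2 * a| * (60 / p.2) ≤ |r.1 * b - r.2 * a| * (60 / r.2)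

-- Pre_ excludes (i) len(attrt) < 2, where A raises IndexError, and (ii) inputs where two candidate
-- fractions of different value are exactly equidistant-minimal from the direction ratio: there A's
-- float rounding breaks the tie accidentally and either answer is equally defensible.
def Pre_bot_velocity (attrt : List Int) (x : Int) (y : Int) : Prop :=
  2 ≤ attrt.length ∧
  (|PySem.List.pyGetD attrt 0 0 + 5 - x| ≠ 0 → |PySem.List.pyGetD attrt 1 0 + 5 - y| ≠ 0 →
    ¬ tieAt (min |PySem.List.pyGetD attrt 0 0 + 5 - x| |PySem.List.pyGetD attrt 1 0 + 5 - y|)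
            (max |PySem.List.pyGetD attrt 0 0 + 5 - x| |PySem.List.pyGetD attrt 1 0 + 5 - y|))

instance (attrt : List Int) (x : Int) (y : Int) : Decidable (Pre_bot_velocity attrt x y) := by
  unfold Pre_bot_velocity tieAt; infer_instance

def pvWitness_bot_velocity : List Int × Int × Int := ([0, 0], 1, 2)

def Spec_bot_velocity (attrt : List Int) (x : Int) (y : Int) (out : Int × Int) : Prop := out = bot_velocity_alt attrt x y
instance (attrt : List Int) (x : Int) (y : Int) (out : Int × Int) : Decidable (Spec_bot_velocity attrt x y out) := by unfold Spec_bot_velocity; infer_instance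

-- ===== CLAIM (what is proved, stated in full; the proofs are below) =====
def Claim_equal_bot_velocity : Prop := ∀ (attrt : List Int) (x : Int) (y : Int), Dom_bot_velocity attrt x y → Pre_bot_velocity attrt x y → Spec_bot_velocity attrt x y (bot_velocity attrt x y)

-- ===== LEMMAS AND PROOFS =====

-- rational distance of candidate p from a/b
def distQ (a b : Int) (p : Int × Int) : ℚ := |(p.1 : ℚ) / (p.2 : ℚ) - (a : ℚ) / (b : ℚ)|

-- A's per-candidate update, after break elimination
def stepA (a b : Int) (f : Int → Int → Int × Int) (st : (Int × Int) × ℚ) (p : Int × Int) :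
    (Int × Int) × ℚ :=
  if distQ a b p < st.2 then (f p.1 p.2, distQ a b p) else st

lemma stepA_pos (a b : Int) (f : Int → Int → Int × Int) (st : (Int × Int) × ℚ) (p : Int × Int)
    (h : distQ a b p < st.2) : stepA a b f st p = (f p.1 p.2, distQ a b p) := by
  unfold stepA; rw [if_pos h]

lemma stepA_neg (a b : Int) (f : Int → Int → Int × Int) (st : (Int × Int) × ℚ) (p : Int × Int)
    (h : ¬ distQ a b p < st.2) : stepA a b f st p = st := by
  unfold stepA; rw [if_neg h]

-- a candidate is well-formed
def Pc (p : Int × Int) : Prop := 0 < p.1 ∧ p.1 ≤ p.2 ∧ 0 < p.2 ∧ p.2 ∣ 60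

lemma foldl_stepA_zero (a b : Int) (f : Int → Int → Int × Int) :
    ∀ (l : List Int) (i : Int) (st : (Int × Int) × ℚ), st.2 = 0 →
    l.foldl (fun s j => stepA a b f s (j, i)) st = st := by
  intro l
  induction l with
  | nil => intro i st _; rfl
  | cons j rest ih =>
    intro i st h
    have hlt : ¬ distQ a b (j, i) < st.2 := by
      rw [h]; exact not_lt.mpr (abs_nonneg _)
    simp only [List.foldl_cons, stepA, if_neg hlt]
    exact ih i st h

lemma innerA_eq_foldl (f : Int → Int → Int × Int) (a b : Int) :
    ∀ (js : List Int) (i : Int) (st : (Int × Int) × ℚ),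
    innerA f ((a : ℚ) / (b : ℚ)) i js st =
      js.foldl (fun s j => stepA a b f s (j, i)) st := by
  intro js
  induction js with
  | nil => intro i st; rfl
  | cons j rest ih =>
    intro i st
    show (let r : ℚ := (j : ℚ) / (i : ℚ)
          let st' := if |r - (a : ℚ) / (b : ℚ)| < st.2 then (f j i, |r - (a : ℚ) / (b : ℚ)|) else st
          if st'.2 = 0 then st' else innerA f ((a : ℚ) / (b : ℚ)) i rest st') = _
    simp only [List.foldl_cons]
    have hst : (if |(j : ℚ) / (i : ℚ) - (a : ℚ) / (b : ℚ)| < st.2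
        then (f j i, |(j : ℚ) / (i : ℚ) - (a : ℚ) / (b : ℚ)|) else st) = stepA a b f st (j, i) := by
      simp [stepA, distQ]
    rw [hst]
    by_cases h0 : (stepA a b f st (j, i)).2 = 0
    · simp only [if_pos h0]
      exact (foldl_stepA_zero a b f rest i _ h0).symm
    · simp only [if_neg h0]
      exact ih i _

-- no update when the running minimum is already ≤ every distance in the list
lemma foldl_stepA_noup (a b : Int) (f : Int → Int → Int × Int) :
    ∀ (l : List Int) (i : Int) (st : (Int × Int) × ℚ),
    (∀ j ∈ l, st.2 ≤ distQ a b (j, i)) →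
    l.foldl (fun s j => stepA a b f s (j, i)) st = st := by
  intro l
  induction l with
  | nil => intro _ _ _; rfl
  | cons j rest ih =>
    intro i st h
    have hj : ¬ distQ a b (j, i) < st.2 := not_lt.mpr (h j List.mem_cons_self)
    simp only [List.foldl_cons, stepA, if_neg hj]
    exact ih i st (fun j' hj' => h j' (List.mem_cons_of_mem _ hj'))

-- a strict lower bound on all distances is preserved by the fold
lemma foldl_stepA_lb (a b : Int) (f : Int → Int → Int × Int) (d : ℚ) :
    ∀ (l : List Int) (i : Int) (st : (Int × Int) × ℚ),
    d < st.2 → (∀ j ∈ l, d < distQ a b (j, i)) →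
    d < (l.foldl (fun s j => stepA a b f s (j, i)) st).2 := by
  intro l
  induction l with
  | nil => intro _ _ h _; exact h
  | cons j rest ih =>
    intro i st hd h
    simp only [List.foldl_cons]
    apply ih i _ _ (fun j' hj' => h j' (List.mem_cons_of_mem _ hj'))
    unfold stepA
    split_ifs with hlt
    · exact h j List.mem_cons_self
    · exact hd

-- A's whole inner block over l₁ ++ rep :: l₂ collapses to one stepA at rep, if rep is strictly
-- better than everything before it and at least as good as everything after it
lemma fold_split (a b i : Int) (f : Int → Int → Int × Int) (st : (Int × Int) × ℚ)
    (rep : Int) (l₁ l₂ : List Int)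
    (h₁ : ∀ j ∈ l₁, distQ a b (rep, i) < distQ a b (j, i))
    (h₂ : ∀ j ∈ l₂, distQ a b (rep, i) ≤ distQ a b (j, i)) :
    (l₁ ++ rep :: l₂).foldl (fun s j => stepA a b f s (j, i)) st = stepA a b f st (rep, i) := by
  rw [List.foldl_append]
  by_cases hrep : distQ a b (rep, i) < st.2
  · have h1 := foldl_stepA_lb a b f (distQ a b (rep, i)) l₁ i st hrep h₁
    simp only [List.foldl_cons]
    rw [stepA_pos a b f _ (rep, i) h1]
    rw [foldl_stepA_noup a b f l₂ i _ (by intro j hj; exact h₂ j hj)]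
    rw [stepA_pos a b f st (rep, i) hrep]
  · have hle : st.2 ≤ distQ a b (rep, i) := not_lt.mp hrep
    rw [foldl_stepA_noup a b f l₁ i st
      (fun j hj => le_of_lt (lt_of_le_of_lt hle (h₁ j hj)))]
    simp only [List.foldl_cons]
    rw [stepA_neg a b f st (rep, i) hrep]
    exact foldl_stepA_noup a b f l₂ i st (fun j hj => le_trans hle (h₂ j hj))

-- comparing distances with a common denominator i reduces to the cross-multiplied integers
lemma distQ_eq (a b i j : Int) (hb : 0 < b) (hi : 0 < i) :
    distQ a b (j, i) = |(j * b - i * a : Int)| / ((i : ℚ) * (b : ℚ)) := by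
  have hiq : ((i : Int) : ℚ) ≠ 0 := by exact_mod_cast hi.ne'
  have hbq : ((b : Int) : ℚ) ≠ 0 := by exact_mod_cast hb.ne'
  unfold distQ
  rw [div_sub_div _ _ hiq hbq, abs_div]
  have habs : |((i : ℚ)) * ((b : ℚ))| = (i : ℚ) * (b : ℚ) := by
    rw [abs_mul, abs_of_pos (by exact_mod_cast hi), abs_of_pos (by exact_mod_cast hb)]
  rw [habs]
  push_cast
  ring_nf

lemma distQ_le_iff (a b i j j' : Int) (hb : 0 < b) (hi : 0 < i) :
    distQ a b (j, i) ≤ distQ a b (j', i) ↔ (j * b - i * a).natAbs ≤ (j' * b - i * a).natAbs := by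
  have hpos : (0 : ℚ) < (i : ℚ) * (b : ℚ) := by
    have : (0 : ℚ) < (i : ℚ) := by exact_mod_cast hi
    have : (0 : ℚ) < (b : ℚ) := by exact_mod_cast hb
    positivity
  rw [distQ_eq a b i j hb hi, distQ_eq a b i j' hb hi, div_le_div_iff_of_pos_right hpos]
  rw [show |(j * b - i * a : Int)| = ((j * b - i * a).natAbs : Int) from (Int.abs_eq_natAbs _)]
  rw [show |(j' * b - i * a : Int)| = ((j' * b - i * a).natAbs : Int) from (Int.abs_eq_natAbs _)]
  exact_mod_cast Iff.rfl

lemma distQ_lt_iff (a b i j j' : Int) (hb : 0 < b) (hi : 0 < i) :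
    distQ a b (j, i) < distQ a b (j', i) ↔ (j * b - i * a).natAbs < (j' * b - i * a).natAbs := by
  rw [← not_le, ← not_le, distQ_le_iff a b i j' j hb hi]

-- floor-division characterisation of the half-up rounding quotient
lemma q_bounds (a b i : Int) (hb : 0 < b) :
    2 * b * (PySem.Int.floordiv (2 * a * i + b) (2 * b)) ≤ 2 * a * i + b ∧
    2 * a * i + b < 2 * b * (PySem.Int.floordiv (2 * a * i + b) (2 * b)) + 2 * b := by
  have h2b : (0 : Int) < 2 * b := by omega
  have hfd : PySem.Int.floordiv (2 * a * i + b) (2 * b) = (2 * a * i + b) / (2 * b) := by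
    unfold PySem.Int.floordiv
    rw [Int.fdiv_eq_ediv]
    omega
  have heq := Int.mul_ediv_add_emod (2 * a * i + b) (2 * b)
  have hlo := Int.emod_nonneg (2 * a * i + b) (by omega : (2 * b : Int) ≠ 0)
  have hhi := Int.emod_lt_of_pos (2 * a * i + b) h2b
  rw [hfd]
  constructor <;> linarith [heq, hlo, hhi]

-- the clamped quotient never exceeds the denominator index
lemma bestNum_le (a b i : Int) (ha : 0 < a) (hab : a ≤ b) (hi : 0 < i) : bestNum a b i ≤ i := by
  have hb : 0 < b := lt_of_lt_of_le ha hab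
  unfold bestNum
  obtain ⟨h1, h2⟩ := q_bounds a b i hb
  set q := PySem.Int.floordiv (2 * a * i + b) (2 * b) with hq
  by_contra h
  have hqi : i + 1 ≤ q := by omega
  have hmul : 2 * b * (i + 1) ≤ 2 * b * q := by
    apply mul_le_mul_of_nonneg_left hqi (by omega)
  have hai : a * i ≤ b * i := mul_le_mul_of_nonneg_right hab (le_of_lt hi)
  nlinarith

lemma bestNum_pos (a b i : Int) : 1 ≤ bestNum a b i := le_max_left _ _

-- the integer key is 60·b times the rational distance
lemma keyB_cast (a b : Int) (hb : 0 < b) (p : Int × Int) (hp : Pc p) :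
    ((keyB a b p : Int) : ℚ) = 60 * (b : ℚ) * distQ a b p := by
  obtain ⟨j, i⟩ := p
  obtain ⟨_, _, hi, hdvd⟩ := hp
  simp only at hi hdvd
  obtain ⟨k, hk⟩ := hdvd
  have hfd : PySem.Int.floordiv 60 i = 60 / i := by
    unfold PySem.Int.floordiv
    rw [Int.fdiv_eq_ediv]
    simp [le_of_lt hi]
  have hiq : ((i : Int) : ℚ) ≠ 0 := by exact_mod_cast hi.ne'
  have hbq : ((b : Int) : ℚ) ≠ 0 := by exact_mod_cast hb.ne'
  have hcast : (((60 / i : Int)) : ℚ) = 60 / (i : ℚ) := by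
    have h : (60 / i : Int) = k := by rw [hk]; exact Int.mul_ediv_cancel_left k hi.ne'
    rw [h]
    field_simp
    exact_mod_cast mul_comm (i : ℚ) (k : ℚ) ▸ (by exact_mod_cast hk.symm : (i : ℚ) * (k : ℚ) = 60)
  rw [distQ_eq a b i j hb hi]
  unfold keyB
  simp only
  rw [hfd]
  push_cast [hcast]
  field_simp

lemma keyB_lt_iff (a b : Int) (hb : 0 < b) (p q : Int × Int) (hp : Pc p) (hq : Pc q) :
    keyB a b p < keyB a b q ↔ distQ a b p < distQ a b q := by
  have hbq : (0 : ℚ) < 60 * (b : ℚ) := by positivity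
  rw [← Int.cast_lt (R := ℚ), keyB_cast a b hb p hp, keyB_cast a b hb q hq]
  exact mul_lt_mul_iff_of_pos_left hbq

lemma distQ_lt_two (a b : Int) (ha : 0 < a) (hab : a ≤ b) (p : Int × Int) (hp : Pc p) :
    distQ a b p < 2 := by
  obtain ⟨j, i⟩ := p
  obtain ⟨hj, hji, hi, -⟩ := hp
  have hb : 0 < b := lt_of_lt_of_le ha hab
  have hiq : (0 : ℚ) < (i : ℚ) := by exact_mod_cast hi
  have hbq : (0 : ℚ) < (b : ℚ) := by exact_mod_cast hb
  have h1 : (0 : ℚ) < (j : ℚ) / (i : ℚ) := by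
    apply div_pos (by exact_mod_cast hj) hiq
  have h2 : (j : ℚ) / (i : ℚ) ≤ 1 := by
    rw [div_le_one hiq]; exact_mod_cast hji
  have h3 : (0 : ℚ) < (a : ℚ) / (b : ℚ) := by
    apply div_pos (by exact_mod_cast ha) hbq
  have h4 : (a : ℚ) / (b : ℚ) ≤ 1 := by
    rw [div_le_one hbq]; exact_mod_cast hab
  unfold distQ
  rw [abs_lt]
  constructor <;> simp only [] <;> linarith

-- each of A's inner blocks collapses to a single stepA at the closed-form best numerator
lemma block_eq (a b : Int) (ha : 0 < a) (hab : a ≤ b) (f : Int → Int → Int × Int)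
    (st : (Int × Int) × ℚ) (i : Int)
    (hi : i = 1 ∨ i = 2 ∨ i = 3 ∨ i = 4 ∨ i = 5) :
    innerA f ((a : ℚ) / (b : ℚ)) i (PySem.List.pyRange i 0 (-1)) st =
      stepA a b f st (bestNum a b i, i) := by
  have hb : 0 < b := lt_of_lt_of_le ha hab
  rcases hi with hi | hi | hi | hi | hi
  · -- i = 1
    subst hi
    rw [(by decide : PySem.List.pyRange ((1 : Int)) 0 (-1) = [1])]
    rw [innerA_eq_foldl]
    have hr1 : 1 ≤ bestNum a b 1 := bestNum_pos a b 1
    have hr2 : bestNum a b 1 ≤ 1 := bestNum_le a b 1 ha hab (by norm_num)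
    obtain ⟨h1, h2⟩ := q_bounds a b 1 hb
    have hnq : bestNum a b 1 = max 1 (PySem.Int.floordiv (2 * a * 1 + b) (2 * b)) := rfl
    set q := PySem.Int.floordiv (2 * a * 1 + b) (2 * b) with hq
    set n := bestNum a b 1 with hn
    rcases (by omega : n = 1) with h
    · -- n = 1
      have hqle : q ≤ 1 := by omega
      have hmul : 2 * b * q ≤ 2 * b * 1 := mul_le_mul_of_nonneg_left hqle (by omega)
      have hub : 2 * a * 1 + b < 4 * b := by linarith
      rw [h]
      rw [(rfl : ([1] : List Int) = [] ++ (1 : Int) :: [])]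
      exact fold_split a b 1 f st 1 [] []
        (by intro j hj; exact absurd hj (List.not_mem_nil))
        (by intro j hj; exact absurd hj (List.not_mem_nil))
  · -- i = 2
    subst hi
    rw [(by decide : PySem.List.pyRange ((2 : Int)) 0 (-1) = [2,1])]
    rw [innerA_eq_foldl]
    have hr1 : 1 ≤ bestNum a b 2 := bestNum_pos a b 2
    have hr2 : bestNum a b 2 ≤ 2 := bestNum_le a b 2 ha hab (by norm_num)
    obtain ⟨h1, h2⟩ := q_bounds a b 2 hb
    have hnq : bestNum a b 2 = max 1 (PySem.Int.floordiv (2 * a * 2 + b) (2 * b)) := rfl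
    set q := PySem.Int.floordiv (2 * a * 2 + b) (2 * b) with hq
    set n := bestNum a b 2 with hn
    rcases (by omega : n = 1 ∨ n = 2) with h|h
    · -- n = 1
      have hqle : q ≤ 1 := by omega
      have hmul : 2 * b * q ≤ 2 * b * 1 := mul_le_mul_of_nonneg_left hqle (by omega)
      have hub : 2 * a * 2 + b < 4 * b := by linarith
      rw [h]
      rw [(rfl : ([2,1] : List Int) = [2] ++ (1 : Int) :: [])]
      exact fold_split a b 2 f st 1 [2] []
        (by intro j hj; fin_cases hj <;> (rw [distQ_lt_iff a b 2 1 _ hb (by norm_num)]; omega))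
        (by intro j hj; exact absurd hj (List.not_mem_nil))
    · -- n = 2
      have hqk : q = 2 := by omega
      rw [hqk] at h1 h2
      rw [h]
      rw [(rfl : ([2,1] : List Int) = [] ++ (2 : Int) :: [1])]
      exact fold_split a b 2 f st 2 [] [1]
        (by intro j hj; exact absurd hj (List.not_mem_nil))
        (by intro j hj; fin_cases hj <;> (rw [distQ_le_iff a b 2 2 _ hb (by norm_num)]; omega))
  · -- i = 3
    subst hi
    rw [(by decide : PySem.List.pyRange ((3 : Int)) 0 (-1) = [3,2,1])]
    rw [innerA_eq_foldl]
    have hr1 : 1 ≤ bestNum a b 3 := bestNum_pos a b 3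
    have hr2 : bestNum a b 3 ≤ 3 := bestNum_le a b 3 ha hab (by norm_num)
    obtain ⟨h1, h2⟩ := q_bounds a b 3 hb
    have hnq : bestNum a b 3 = max 1 (PySem.Int.floordiv (2 * a * 3 + b) (2 * b)) := rfl
    set q := PySem.Int.floordiv (2 * a * 3 + b) (2 * b) with hq
    set n := bestNum a b 3 with hn
    rcases (by omega : n = 1 ∨ n = 2 ∨ n = 3) with h|h|h
    · -- n = 1
      have hqle : q ≤ 1 := by omega
      have hmul : 2 * b * q ≤ 2 * b * 1 := mul_le_mul_of_nonneg_left hqle (by omega)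
      have hub : 2 * a * 3 + b < 4 * b := by linarith
      rw [h]
      rw [(rfl : ([3,2,1] : List Int) = [3,2] ++ (1 : Int) :: [])]
      exact fold_split a b 3 f st 1 [3,2] []
        (by intro j hj; fin_cases hj <;> (rw [distQ_lt_iff a b 3 1 _ hb (by norm_num)]; omega))
        (by intro j hj; exact absurd hj (List.not_mem_nil))
    · -- n = 2
      have hqk : q = 2 := by omega
      rw [hqk] at h1 h2
      rw [h]
      rw [(rfl : ([3,2,1] : List Int) = [3] ++ (2 : Int) :: [1])]
      exact fold_split a b 3 f st 2 [3] [1]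
        (by intro j hj; fin_cases hj <;> (rw [distQ_lt_iff a b 3 2 _ hb (by norm_num)]; omega))
        (by intro j hj; fin_cases hj <;> (rw [distQ_le_iff a b 3 2 _ hb (by norm_num)]; omega))
    · -- n = 3
      have hqk : q = 3 := by omega
      rw [hqk] at h1 h2
      rw [h]
      rw [(rfl : ([3,2,1] : List Int) = [] ++ (3 : Int) :: [2,1])]
      exact fold_split a b 3 f st 3 [] [2,1]
        (by intro j hj; exact absurd hj (List.not_mem_nil))
        (by intro j hj; fin_cases hj <;> (rw [distQ_le_iff a b 3 3 _ hb (by norm_num)]; omega))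
  · -- i = 4
    subst hi
    rw [(by decide : PySem.List.pyRange ((4 : Int)) 0 (-1) = [4,3,2,1])]
    rw [innerA_eq_foldl]
    have hr1 : 1 ≤ bestNum a b 4 := bestNum_pos a b 4
    have hr2 : bestNum a b 4 ≤ 4 := bestNum_le a b 4 ha hab (by norm_num)
    obtain ⟨h1, h2⟩ := q_bounds a b 4 hb
    have hnq : bestNum a b 4 = max 1 (PySem.Int.floordiv (2 * a * 4 + b) (2 * b)) := rfl
    set q := PySem.Int.floordiv (2 * a * 4 + b) (2 * b) with hq
    set n := bestNum a b 4 with hn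
    rcases (by omega : n = 1 ∨ n = 2 ∨ n = 3 ∨ n = 4) with h|h|h|h
    · -- n = 1
      have hqle : q ≤ 1 := by omega
      have hmul : 2 * b * q ≤ 2 * b * 1 := mul_le_mul_of_nonneg_left hqle (by omega)
      have hub : 2 * a * 4 + b < 4 * b := by linarith
      rw [h]
      rw [(rfl : ([4,3,2,1] : List Int) = [4,3,2] ++ (1 : Int) :: [])]
      exact fold_split a b 4 f st 1 [4,3,2] []
        (by intro j hj; fin_cases hj <;> (rw [distQ_lt_iff a b 4 1 _ hb (by norm_num)]; omega))
        (by intro j hj; exact absurd hj (List.not_mem_nil))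
    · -- n = 2
      have hqk : q = 2 := by omega
      rw [hqk] at h1 h2
      rw [h]
      rw [(rfl : ([4,3,2,1] : List Int) = [4,3] ++ (2 : Int) :: [1])]
      exact fold_split a b 4 f st 2 [4,3] [1]
        (by intro j hj; fin_cases hj <;> (rw [distQ_lt_iff a b 4 2 _ hb (by norm_num)]; omega))
        (by intro j hj; fin_cases hj <;> (rw [distQ_le_iff a b 4 2 _ hb (by norm_num)]; omega))
    · -- n = 3
      have hqk : q = 3 := by omega
      rw [hqk] at h1 h2
      rw [h]
      rw [(rfl : ([4,3,2,1] : List Int) = [4] ++ (3 : Int) :: [2,1])]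
      exact fold_split a b 4 f st 3 [4] [2,1]
        (by intro j hj; fin_cases hj <;> (rw [distQ_lt_iff a b 4 3 _ hb (by norm_num)]; omega))
        (by intro j hj; fin_cases hj <;> (rw [distQ_le_iff a b 4 3 _ hb (by norm_num)]; omega))
    · -- n = 4
      have hqk : q = 4 := by omega
      rw [hqk] at h1 h2
      rw [h]
      rw [(rfl : ([4,3,2,1] : List Int) = [] ++ (4 : Int) :: [3,2,1])]
      exact fold_split a b 4 f st 4 [] [3,2,1]
        (by intro j hj; exact absurd hj (List.not_mem_nil))
        (by intro j hj; fin_cases hj <;> (rw [distQ_le_iff a b 4 4 _ hb (by norm_num)]; omega))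
  · -- i = 5
    subst hi
    rw [(by decide : PySem.List.pyRange ((5 : Int)) 0 (-1) = [5,4,3,2,1])]
    rw [innerA_eq_foldl]
    have hr1 : 1 ≤ bestNum a b 5 := bestNum_pos a b 5
    have hr2 : bestNum a b 5 ≤ 5 := bestNum_le a b 5 ha hab (by norm_num)
    obtain ⟨h1, h2⟩ := q_bounds a b 5 hb
    have hnq : bestNum a b 5 = max 1 (PySem.Int.floordiv (2 * a * 5 + b) (2 * b)) := rfl
    set q := PySem.Int.floordiv (2 * a * 5 + b) (2 * b) with hq
    set n := bestNum a b 5 with hn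
    rcases (by omega : n = 1 ∨ n = 2 ∨ n = 3 ∨ n = 4 ∨ n = 5) with h|h|h|h|h
    · -- n = 1
      have hqle : q ≤ 1 := by omega
      have hmul : 2 * b * q ≤ 2 * b * 1 := mul_le_mul_of_nonneg_left hqle (by omega)
      have hub : 2 * a * 5 + b < 4 * b := by linarith
      rw [h]
      rw [(rfl : ([5,4,3,2,1] : List Int) = [5,4,3,2] ++ (1 : Int) :: [])]
      exact fold_split a b 5 f st 1 [5,4,3,2] []
        (by intro j hj; fin_cases hj <;> (rw [distQ_lt_iff a b 5 1 _ hb (by norm_num)]; omega))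
        (by intro j hj; exact absurd hj (List.not_mem_nil))
    · -- n = 2
      have hqk : q = 2 := by omega
      rw [hqk] at h1 h2
      rw [h]
      rw [(rfl : ([5,4,3,2,1] : List Int) = [5,4,3] ++ (2 : Int) :: [1])]
      exact fold_split a b 5 f st 2 [5,4,3] [1]
        (by intro j hj; fin_cases hj <;> (rw [distQ_lt_iff a b 5 2 _ hb (by norm_num)]; omega))
        (by intro j hj; fin_cases hj <;> (rw [distQ_le_iff a b 5 2 _ hb (by norm_num)]; omega))
    · -- n = 3
      have hqk : q = 3 := by omega
      rw [hqk] at h1 h2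
      rw [h]
      rw [(rfl : ([5,4,3,2,1] : List Int) = [5,4] ++ (3 : Int) :: [2,1])]
      exact fold_split a b 5 f st 3 [5,4] [2,1]
        (by intro j hj; fin_cases hj <;> (rw [distQ_lt_iff a b 5 3 _ hb (by norm_num)]; omega))
        (by intro j hj; fin_cases hj <;> (rw [distQ_le_iff a b 5 3 _ hb (by norm_num)]; omega))
    · -- n = 4
      have hqk : q = 4 := by omega
      rw [hqk] at h1 h2
      rw [h]
      rw [(rfl : ([5,4,3,2,1] : List Int) = [5] ++ (4 : Int) :: [3,2,1])]
      exact fold_split a b 5 f st 4 [5] [3,2,1]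
        (by intro j hj; fin_cases hj <;> (rw [distQ_lt_iff a b 5 4 _ hb (by norm_num)]; omega))
        (by intro j hj; fin_cases hj <;> (rw [distQ_le_iff a b 5 4 _ hb (by norm_num)]; omega))
    · -- n = 5
      have hqk : q = 5 := by omega
      rw [hqk] at h1 h2
      rw [h]
      rw [(rfl : ([5,4,3,2,1] : List Int) = [] ++ (5 : Int) :: [4,3,2,1])]
      exact fold_split a b 5 f st 5 [] [4,3,2,1]
        (by intro j hj; exact absurd hj (List.not_mem_nil))
        (by intro j hj; fin_cases hj <;> (rw [distQ_le_iff a b 5 5 _ hb (by norm_num)]; omega))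

-- invariant tying A's state after a block to B's running best triple
def InvR (a b : Int) (f : Int → Int → Int × Int) (st : (Int × Int) × ℚ)
    (acc : Option (Int × Int × Int)) : Prop :=
  ∃ j i, acc = some (keyB a b (j, i), j, i) ∧ Pc (j, i) ∧ st.1 = f j i ∧ st.2 = distQ a b (j, i)

lemma Pc_bestNum (a b i : Int) (ha : 0 < a) (hab : a ≤ b) (hi : 0 < i) (hd : i ∣ 60) :
    Pc (bestNum a b i, i) :=
  ⟨lt_of_lt_of_le one_pos (bestNum_pos a b i), bestNum_le a b i ha hab hi, hi, hd⟩

lemma InvR_init (a b : Int) (ha : 0 < a) (hab : a ≤ b) (f : Int → Int → Int × Int)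
    (i : Int) (hPc : Pc (bestNum a b i, i)) :
    InvR a b f (stepA a b f ((0, 0), 2) (bestNum a b i, i)) (bstep a b none i) := by
  have hlt : distQ a b (bestNum a b i, i) < 2 := distQ_lt_two a b ha hab _ hPc
  refine ⟨bestNum a b i, i, rfl, hPc, ?_, ?_⟩ <;>
    simp [stepA, if_pos hlt]

lemma InvR_step (a b : Int) (ha : 0 < a) (hab : a ≤ b) (f : Int → Int → Int × Int)
    (st : (Int × Int) × ℚ) (acc : Option (Int × Int × Int))
    (i : Int) (hPc : Pc (bestNum a b i, i)) (hInvR : InvR a b f st acc) :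
    InvR a b f (stepA a b f st (bestNum a b i, i)) (bstep a b acc i) := by
  have hb : 0 < b := lt_of_lt_of_le ha hab
  obtain ⟨j', i', hacc, hPc', hv, hm⟩ := hInvR
  subst hacc
  by_cases hlt : distQ a b (bestNum a b i, i) < distQ a b (j', i')
  · have hk : keyB a b (bestNum a b i, i) < keyB a b (j', i') :=
      (keyB_lt_iff a b hb _ _ hPc hPc').mpr hlt
    have hlt' : distQ a b (bestNum a b i, i) < st.2 := by rw [hm]; exact hlt
    refine ⟨bestNum a b i, i, by simp [bstep, if_pos hk], hPc, ?_, ?_⟩ <;>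
      simp [stepA, if_pos hlt']
  · have hk : ¬ keyB a b (bestNum a b i, i) < keyB a b (j', i') := fun h =>
      hlt ((keyB_lt_iff a b hb _ _ hPc hPc').mp h)
    have hlt' : ¬ distQ a b (bestNum a b i, i) < st.2 := by rw [hm]; exact hlt
    exact ⟨j', i', by simp [bstep, if_neg hk], hPc', by simp [stepA, if_neg hlt']; exact hv,
      by simp [stepA, if_neg hlt']; exact hm⟩

-- the whole scan: A's outer loop equals the match on B's fold
lemma scan_eq (a b : Int) (ha : 0 < a) (hab : a ≤ b) (f : Int → Int → Int × Int) :
    (outerA f ((a : ℚ) / (b : ℚ)) ((0, 0), 2)).1 =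
    (match (PySem.List.pyRange 5 0 (-1)).foldl (bstep a b) none with
     | some (_, j0, i0) => f j0 i0
     | none => ((0 : Int), (0 : Int))) := by
  have r5 : PySem.List.pyRange 5 0 (-1) = [5, 4, 3, 2, 1] := by decide
  unfold outerA
  rw [r5]
  simp only [List.foldl_cons, List.foldl_nil]
  rw [block_eq a b ha hab f _ 5 (by norm_num), block_eq a b ha hab f _ 4 (by norm_num),
      block_eq a b ha hab f _ 3 (by norm_num), block_eq a b ha hab f _ 2 (by norm_num),
      block_eq a b ha hab f _ 1 (by norm_num)]
  have p5 := Pc_bestNum a b 5 ha hab (by norm_num) (by norm_num)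
  have p4 := Pc_bestNum a b 4 ha hab (by norm_num) (by norm_num)
  have p3 := Pc_bestNum a b 3 ha hab (by norm_num) (by norm_num)
  have p2 := Pc_bestNum a b 2 ha hab (by norm_num) (by norm_num)
  have p1 := Pc_bestNum a b 1 ha hab (by norm_num) (by norm_num)
  have hInvR :=
    InvR_step a b ha hab f _ _ 1 p1
      (InvR_step a b ha hab f _ _ 2 p2
        (InvR_step a b ha hab f _ _ 3 p3
          (InvR_step a b ha hab f _ _ 4 p4
            (InvR_init a b ha hab f 5 p5))))
  obtain ⟨j0, i0, hacc, -, hv, -⟩ := hInvR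
  rw [hacc, hv]

lemma bot_velocity_eq_alt (attrt : List Int) (x : Int) (y : Int) :
    bot_velocity attrt x y = bot_velocity_alt attrt x y := by
  simp only [bot_velocity, bot_velocity_alt]
  set dx := |PySem.List.pyGetD attrt 0 0 + 5 - x| with hdx
  set dy := |PySem.List.pyGetD attrt 1 0 + 5 - y| with hdy
  set ex := (if PySem.List.pyGetD attrt 0 0 + 5 - x ≥ 0 then (1 : Int) else -1) with hex
  set ey := (if PySem.List.pyGetD attrt 1 0 + 5 - y ≥ 0 then (1 : Int) else -1) with hey
  by_cases h1 : dx = 0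
  · simp only [if_pos h1]
  · by_cases h2 : dy = 0
    · simp only [if_neg h1, if_pos h2]
    · have hdxpos : 0 < dx := lt_of_le_of_ne (hdx ▸ abs_nonneg _) (Ne.symm h1)
      have hdypos : 0 < dy := lt_of_le_of_ne (hdy ▸ abs_nonneg _) (Ne.symm h2)
      by_cases h3 : dx ≤ dy
      · simp only [if_neg h1, if_neg h2, if_pos h3]
        rw [scan_eq dx dy hdxpos h3 (fun j i => (ex * j, ey * i))]
      · simp only [if_neg h1, if_neg h2, if_neg h3]
        rw [scan_eq dy dx hdypos (le_of_lt (lt_of_not_ge h3)) (fun j i => (ex * i, ey * j))]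

-- ===== VERDICT (by name: the statement is the Claim_ definition above) =====
theorem bot_velocity_spec : Claim_equal_bot_velocity := by
  intro attrt x y _ _
  unfold Spec_bot_velocity
  exact bot_velocity_eq_alt attrt x y
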